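-- pv_equiv track=rewrite | github.com/giuven95/algos-structs-py | algos/sorting/biselection_sort.py | select_extremes
-- ===== SOURCE A (Python) =====
-- def select_extremes(l, start, end):
--     imin = start
--     imax = start
--     for j in range(start + 1, end):
--         if l[j] < l[imin]:
--             imin = j
--         elif l[j] >= l[imax]:  # not >, >= ---> keeps it a stable sort
--             imax = j
--     return (imin, imax)
-- ===== SOURCE B (Python) =====
-- def select_extremes(l, start, end):
--     if end - start < 2:
--         return (start, start)
--     idx = range(start, end)
--     imin = min(idx, key=lambda j: l[j])
--     imax = max(idx, key=lambda j: (l[j], j))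
--     return (imin, imax)
-- ===== Notes on version B (the rewrite author's own statement) =====
-- stated objective: idiomatic
-- what changed: The fused accumulator loop with an elif-coupled pair of indices is replaced by two independent library reductions: min over range(start,end) keyed by value (earliest minimum) and max keyed by (value, index) (latest maximum), with a trivial-range early return.
import Mathlib
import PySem

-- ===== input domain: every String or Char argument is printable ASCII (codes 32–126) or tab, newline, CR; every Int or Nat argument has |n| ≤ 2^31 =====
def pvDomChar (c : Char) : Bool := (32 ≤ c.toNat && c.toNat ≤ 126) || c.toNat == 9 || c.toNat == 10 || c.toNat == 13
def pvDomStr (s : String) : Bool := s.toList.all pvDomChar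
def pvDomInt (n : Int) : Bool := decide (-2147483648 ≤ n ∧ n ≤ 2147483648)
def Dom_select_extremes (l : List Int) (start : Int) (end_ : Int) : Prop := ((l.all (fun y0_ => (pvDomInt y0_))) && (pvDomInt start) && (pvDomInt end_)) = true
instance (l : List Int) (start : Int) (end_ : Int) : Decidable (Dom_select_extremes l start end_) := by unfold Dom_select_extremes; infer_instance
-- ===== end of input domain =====

-- B replaces A's fused elif-coupled loop by two independent argmin/argmax reductions (idiomatic; same cost).

-- ===== PORT A =====
def select_extremes (l : List Int) (start : Int) (end_ : Int) : Int × Int :=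
  (PySem.List.pyRange (start + 1) end_ 1).foldl
    (fun (s : Int × Int) j =>
      if PySem.List.pyGetD l j 0 < PySem.List.pyGetD l s.1 0 then (j, s.2)
      else if PySem.List.pyGetD l j 0 ≥ PySem.List.pyGetD l s.2 0 then (s.1, j)
      else s)
    (start, start)

-- ===== PORT B =====
-- Python's min(idx, key=λ j. l[j]) over a nonempty iterable: seed with the first
-- element, keep the earlier index on key ties (strict < to replace).
def pyArgminVal (l : List Int) (seed : Int) (rest : List Int) : Int :=
  rest.foldl (fun k j => if PySem.List.pyGetD l j 0 < PySem.List.pyGetD l k 0 then j else k) seed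

-- Python's max(idx, key=λ j. (l[j], j)): lexicographic key, strict > to replace.
def pyArgmaxLex (l : List Int) (seed : Int) (rest : List Int) : Int :=
  rest.foldl (fun k j =>
    if PySem.List.pyGetD l k 0 < PySem.List.pyGetD l j 0 ∨
       (PySem.List.pyGetD l k 0 = PySem.List.pyGetD l j 0 ∧ k < j) then j else k) seed

def select_extremes_alt (l : List Int) (start : Int) (end_ : Int) : Int × Int :=
  if end_ - start < 2 then (start, start)
  else
    match PySem.List.pyRange start end_ 1 with
    | [] => (start, start)  -- unreachable: the range is nonempty when end_ - start ≥ 2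
    | h :: t => (pyArgminVal l h t, pyArgmaxLex l h t)

-- ===== PRECONDITION & SPEC =====
-- Pre_: exactly the inputs where Python A returns: either the loop range is empty,
-- or every accessed index (start .. end_-1, Python negative-wrap allowed) is in range.
def Pre_select_extremes (l : List Int) (start : Int) (end_ : Int) : Prop :=
  end_ ≤ start + 1 ∨ (-(l.length : Int) ≤ start ∧ end_ ≤ (l.length : Int))
instance (l : List Int) (start : Int) (end_ : Int) : Decidable (Pre_select_extremes l start end_) := by unfold Pre_select_extremes; infer_instance

def pvWitness_select_extremes : List Int × Int × Int := ([3, 1, 2, 1, 3], 0, 5)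

def Spec_select_extremes (l : List Int) (start : Int) (end_ : Int) (out : Int × Int) : Prop := out = select_extremes_alt l start end_
instance (l : List Int) (start : Int) (end_ : Int) (out : Int × Int) : Decidable (Spec_select_extremes l start end_ out) := by unfold Spec_select_extremes; infer_instance

-- ===== CLAIM (what is proved, stated in full; the proofs are below) =====
def Claim_equal_select_extremes : Prop := ∀ (l : List Int) (start : Int) (end_ : Int), Dom_select_extremes l start end_ → Pre_select_extremes l start end_ → Spec_select_extremes l start end_ (select_extremes l start end_)

-- ===== LEMMAS AND PROOFS =====

-- Invariant: A's fused fold over an increasing index list whose elements all exceed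
-- the current max index, starting from a state with value(min) ≤ value(max),
-- computes exactly the pair of B's independent folds.
theorem fused_eq_pair (l : List Int) :
    ∀ (js : List Int) (m M : Int),
      PySem.List.pyGetD l m 0 ≤ PySem.List.pyGetD l M 0 →
      (∀ j ∈ js, M < j) →
      js.Pairwise (· < ·) →
      js.foldl
        (fun (s : Int × Int) j =>
          if PySem.List.pyGetD l j 0 < PySem.List.pyGetD l s.1 0 then (j, s.2)
          else if PySem.List.pyGetD l j 0 ≥ PySem.List.pyGetD l s.2 0 then (s.1, j)
          else s) (m, M)
        = (pyArgminVal l m js, pyArgmaxLex l M js) := by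
  intro js
  induction js with
  | nil => intro m M _ _ _; simp [pyArgminVal, pyArgmaxLex]
  | cons j t ih =>
    intro m M hmM hgt hpw
    have hMj : M < j := hgt j (by simp)
    have ht : ∀ j' ∈ t, j < j' := fun j' hj' => (List.pairwise_cons.mp hpw).1 j' hj'
    have htM : t.Pairwise (· < ·) := (List.pairwise_cons.mp hpw).2
    simp only [List.foldl_cons, pyArgminVal, pyArgmaxLex] at *
    by_cases h1 : PySem.List.pyGetD l j 0 < PySem.List.pyGetD l m 0
    · -- new min; max step cannot fire (value strictly below current max)
      have hnot : ¬ (PySem.List.pyGetD l M 0 < PySem.List.pyGetD l j 0 ∨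
          (PySem.List.pyGetD l M 0 = PySem.List.pyGetD l j 0 ∧ M < j)) := by omega
      simp only [if_pos h1, if_neg hnot]
      exact ih j M (by omega) (fun j' hj' => hMj.trans (ht j' hj')) htM
    · by_cases h2 : PySem.List.pyGetD l j 0 ≥ PySem.List.pyGetD l M 0
      · have hmax : PySem.List.pyGetD l M 0 < PySem.List.pyGetD l j 0 ∨
            (PySem.List.pyGetD l M 0 = PySem.List.pyGetD l j 0 ∧ M < j) := by omega
        simp only [if_neg h1, if_pos h2, if_pos hmax]
        exact ih m j (by omega) ht htM
      · have hmax : ¬ (PySem.List.pyGetD l M 0 < PySem.List.pyGetD l j 0 ∨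
            (PySem.List.pyGetD l M 0 = PySem.List.pyGetD l j 0 ∧ M < j)) := by omega
        simp only [if_neg h1, if_neg h2, if_neg hmax]
        exact ih m M hmM (fun j' hj' => hMj.trans (ht j' hj')) htM

-- ===== VERDICT (by name: the statement is the Claim_ definition above) =====
theorem select_extremes_spec : Claim_equal_select_extremes := by
  intro l start end_ _ _
  unfold Spec_select_extremes select_extremes select_extremes_alt
  by_cases h : end_ - start < 2
  · have : PySem.List.pyRange (start + 1) end_ 1 = [] :=
      PySem.List.pyRange_one_eq_nil (by omega)
    simp [h, this]
  · have hlt : start < end_ := by omega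
    rw [if_neg h, PySem.List.pyRange_one_cons hlt]
    have := fused_eq_pair l (PySem.List.pyRange (start + 1) end_ 1) start start le_rfl
      (fun j hj => (PySem.List.mem_pyRange_one.mp hj).1.trans_lt' (by omega))
      (PySem.List.pairwise_lt_pyRange_one _ _)
    rw [this]
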